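-- pv_equiv track=rewrite | github.com/jfishb01/avalanche-forecast | src/ingestion/avalanche_forecast/distributors/nwac.py | _get_avalanche_problem_aspect_elevations
-- ===== SOURCE A (Python) =====
-- from typing import Iterable, List, Dict, Any
--
-- def _get_avalanche_problem_aspect_elevations(
--     problem_number: int, aspect_elevations: List[str]
-- ) -> Dict[str, Any]:
--     """Helper method to flatten the elevations and aspects for a given problem number."""
--     elevations = {"alp": "upper", "tln": "middle", "btl": "lower"}
--     aspects = {
--         "n": "north",
--         "ne": "northeast",
--         "e": "east",
--         "se": "southeast",
--         "s": "south",
--         "sw": "southwest",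
--         "w": "west",
--         "nw": "northwest",
--     }
--     transformed = {}
--     for aspect_k, aspect_v in aspects.items():
--         for elevation_k, elevation_v in elevations.items():
--             transformed[f"{aspect_k}_{elevation_k}_{problem_number}"] = int(
--                 f"{aspect_v} {elevation_v}" in aspect_elevations
--             )
--     return transformed
-- ===== SOURCE B (Python) =====
-- def _get_avalanche_problem_aspect_elevations(problem_number, aspect_elevations):
--     """Flatten elevations/aspects for a problem number: zero-init all 24 keys,
--     then one pass over the input via a reverse phrase->key map."""
--     elevations = {"alp": "upper", "tln": "middle", "btl": "lower"}
--     aspects = {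
--         "n": "north",
--         "ne": "northeast",
--         "e": "east",
--         "se": "southeast",
--         "s": "south",
--         "sw": "southwest",
--         "w": "west",
--         "nw": "northwest",
--     }
--     transformed = {}
--     phrase_to_key = {}
--     for aspect_k, aspect_v in aspects.items():
--         for elevation_k, elevation_v in elevations.items():
--             key = f"{aspect_k}_{elevation_k}_{problem_number}"
--             transformed[key] = 0
--             phrase_to_key[f"{aspect_v} {elevation_v}"] = key
--     for phrase in aspect_elevations:
--         key = phrase_to_key.get(phrase)
--         if key is not None:
--             transformed[key] = 1
--     return transformed
-- ===== Notes on version B (the rewrite author's own statement) =====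
-- stated objective: faster
-- what changed: Instead of testing each of the 24 aspect/elevation phrases for membership in the input list (24 linear scans), B zero-initialises the 24-key dict once, builds a reverse phrase-to-key map, and makes a single pass over the input list setting matched keys to 1.
import Mathlib
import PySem

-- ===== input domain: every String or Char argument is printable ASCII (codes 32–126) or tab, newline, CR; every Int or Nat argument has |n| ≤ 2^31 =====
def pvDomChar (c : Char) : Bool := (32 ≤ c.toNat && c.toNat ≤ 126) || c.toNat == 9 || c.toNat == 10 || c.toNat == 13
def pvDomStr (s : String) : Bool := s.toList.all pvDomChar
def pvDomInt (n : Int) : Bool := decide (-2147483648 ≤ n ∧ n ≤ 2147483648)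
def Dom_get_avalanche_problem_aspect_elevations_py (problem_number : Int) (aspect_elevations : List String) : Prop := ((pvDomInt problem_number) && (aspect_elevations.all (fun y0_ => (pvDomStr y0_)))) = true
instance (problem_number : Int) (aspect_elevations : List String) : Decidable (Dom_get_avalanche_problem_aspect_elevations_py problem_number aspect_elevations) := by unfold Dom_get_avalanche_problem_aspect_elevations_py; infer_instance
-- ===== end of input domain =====

-- B replaces A's 24 membership scans of the input list by a zero-initialised dict plus ONE pass
-- over the input through a reverse phrase→key map (objective: faster by a constant factor).

-- ===== PORT A =====
def pvElevs : List (String × String) := [("alp", "upper"), ("tln", "middle"), ("btl", "lower")]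
def pvAspects : List (String × String) :=
  [("n", "north"), ("ne", "northeast"), ("e", "east"), ("se", "southeast"),
   ("s", "south"), ("sw", "southwest"), ("w", "west"), ("nw", "northwest")]

def get_avalanche_problem_aspect_elevations_py (problem_number : Int) (aspect_elevations : List String) : List (String × Int) :=
  (pvAspects.foldl (fun transformed a =>
      pvElevs.foldl (fun transformed e =>
        transformed.insert (a.1 ++ "_" ++ e.1 ++ "_" ++ PySem.Int.toStr problem_number)
          (if (a.2 ++ " " ++ e.2) ∈ aspect_elevations then (1 : Int) else 0)) transformed)
    PySem.Dict.empty).items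

-- ===== PORT B =====
def get_avalanche_problem_aspect_elevations_py_alt (problem_number : Int) (aspect_elevations : List String) : List (String × Int) :=
  let init := pvAspects.foldl (fun (p : PySem.Dict String Int × PySem.Dict String String) a =>
      pvElevs.foldl (fun p e =>
        (p.1.insert (a.1 ++ "_" ++ e.1 ++ "_" ++ PySem.Int.toStr problem_number) 0,
         p.2.insert (a.2 ++ " " ++ e.2) (a.1 ++ "_" ++ e.1 ++ "_" ++ PySem.Int.toStr problem_number))) p)
    (PySem.Dict.empty, PySem.Dict.empty)
  (aspect_elevations.foldl (fun transformed phrase =>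
      match init.2.get? phrase with
      | some key => transformed.insert key 1
      | none => transformed) init.1).items

-- ===== PRECONDITION & SPEC =====
def Spec_get_avalanche_problem_aspect_elevations_py (problem_number : Int) (aspect_elevations : List String) (out : List (String × Int)) : Prop := out = get_avalanche_problem_aspect_elevations_py_alt problem_number aspect_elevations
instance (problem_number : Int) (aspect_elevations : List String) (out : List (String × Int)) : Decidable (Spec_get_avalanche_problem_aspect_elevations_py problem_number aspect_elevations out) := by unfold Spec_get_avalanche_problem_aspect_elevations_py; infer_instance

-- ===== CLAIM (what is proved, stated in full; the proofs are below) =====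
def Claim_equal_get_avalanche_problem_aspect_elevations_py : Prop := ∀ (problem_number : Int) (aspect_elevations : List String), Dom_get_avalanche_problem_aspect_elevations_py problem_number aspect_elevations → Spec_get_avalanche_problem_aspect_elevations_py problem_number aspect_elevations (get_avalanche_problem_aspect_elevations_py problem_number aspect_elevations)

-- ===== LEMMAS AND PROOFS =====

-- the 24 (aspect, elevation) combinations, their key prefixes, keys and phrases
def pvCombos : List ((String × String) × (String × String)) :=
  pvAspects.flatMap (fun a => pvElevs.map (fun e => (a, e)))

def pvPfx (c : (String × String) × (String × String)) : String := c.1.1 ++ "_" ++ c.2.1 ++ "_"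
def pvKey (c : (String × String) × (String × String)) (pn : Int) : String := pvPfx c ++ PySem.Int.toStr pn
def pvPhrase (c : (String × String) × (String × String)) : String := c.1.2 ++ " " ++ c.2.2

lemma pvKey_def (c : (String × String) × (String × String)) (pn : Int) :
    pvKey c pn = c.1.1 ++ "_" ++ c.2.1 ++ "_" ++ PySem.Int.toStr pn := by
  simp [pvKey, pvPfx, String.append_assoc]

lemma pvKeyInj (pn : Int) : ∀ c ∈ pvCombos, ∀ c' ∈ pvCombos, pvKey c pn = pvKey c' pn → c = c' := by
  have h : ∀ c ∈ pvCombos, ∀ c' ∈ pvCombos, pvPfx c = pvPfx c' → c = c' := by decide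
  intro c hc c' hc' he
  exact h c hc c' hc' ((String.append_left_inj _).mp he)

lemma pvPhraseInj : ∀ c ∈ pvCombos, ∀ c' ∈ pvCombos, pvPhrase c = pvPhrase c' → c = c' := by decide

lemma pvKeyNodup (pn : Int) : (pvCombos.map (fun c => pvKey c pn)).Nodup := by
  have : pvCombos.map (fun c => pvKey c pn) = (pvCombos.map pvPfx).map (· ++ PySem.Int.toStr pn) := by
    simp [List.map_map, pvKey]
  rw [this]
  exact ((by decide : (pvCombos.map pvPfx).Nodup)).map
    (fun a b h => (String.append_left_inj _).mp h)

-- the common shape of both sides' dict: all 24 keys in order, values given by v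
def pvTmpl (pn : Int) (v : (String × String) × (String × String) → Int) : PySem.Dict String Int :=
  PySem.Dict.mk (pvCombos.map (fun c => (pvKey c pn, v c)))

-- the reverse phrase → key dict B builds
def pvRev (pn : Int) : PySem.Dict String String :=
  PySem.Dict.mk (pvCombos.map (fun c => (pvPhrase c, pvKey c pn)))

lemma lookup_map {β : Type} (l : List β) (kf : β → String) (vf : β → String) (s : String) :
    (PySem.Dict.mk (l.map (fun c => (kf c, vf c)))).get? s
      = (l.find? (fun c => kf c == s)).map vf := by
  induction l with
  | nil => rfl
  | cons c t ih =>
      simp only [List.map, PySem.Dict.get?_mk_cons, List.find?]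
      by_cases h : (kf c == s) = true
      · simp [h]
      · simp only [h, if_neg, Bool.false_eq_true, not_false_iff]
        simpa using ih

lemma pvRev_get? (pn : Int) (s : String) :
    (pvRev pn).get? s = (pvCombos.find? (fun c => pvPhrase c == s)).map (fun c => pvKey c pn) :=
  lookup_map pvCombos pvPhrase (fun c => pvKey c pn) s

lemma insert_tmpl (pn : Int) (v : (String × String) × (String × String) → Int)
    (c0 : (String × String) × (String × String)) (hc0 : c0 ∈ pvCombos) :
    (pvTmpl pn v).insert (pvKey c0 pn) 1
      = pvTmpl pn (fun c => if pvPhrase c = pvPhrase c0 then 1 else v c) := by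
  apply PySem.Dict.ext
  have hcont : (pvTmpl pn v).contains (pvKey c0 pn) = true := by
    rw [pvTmpl, PySem.Dict.contains_mk, List.any_eq_true]
    exact ⟨(pvKey c0 pn, v c0), List.mem_map.mpr ⟨c0, hc0, rfl⟩, by simp⟩
  rw [PySem.Dict.items_insert_of_contains _ _ hcont]
  simp only [pvTmpl, List.map_map]
  apply List.map_congr_left
  intro c hc
  by_cases h : c = c0
  · subst h; simp
  · have hk : ¬ (pvKey c pn == pvKey c0 pn) = true := by
      simpa using fun he => h (pvKeyInj pn c hc c0 hc0 he)
    have hp : pvPhrase c ≠ pvPhrase c0 := fun he => h (pvPhraseInj c hc c0 hc0 he)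
    simp [Function.comp, hk, hp]

lemma fold_tmpl (pn : Int) (ae : List String) :
    ∀ v, ae.foldl (fun transformed phrase =>
        match (pvRev pn).get? phrase with
        | some key => transformed.insert key 1
        | none => transformed) (pvTmpl pn v)
      = pvTmpl pn (fun c => if pvPhrase c ∈ ae then 1 else v c) := by
  induction ae with
  | nil =>
      intro v
      simp [pvTmpl]
  | cons s rest ih =>
      intro v
      rw [List.foldl_cons]
      cases hf : pvCombos.find? (fun c => pvPhrase c == s) with
      | none =>
          have hg : (pvRev pn).get? s = none := by rw [pvRev_get?, hf]; rfl
          rw [hg]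
          rw [ih v]
          unfold pvTmpl
          congr 1
          apply List.map_congr_left
          intro c hc
          have : pvPhrase c ≠ s := by
            have := List.find?_eq_none.mp hf c hc
            simpa using this
          simp [List.mem_cons, this]
      | some c0 =>
          have hc0 : c0 ∈ pvCombos := List.mem_of_find?_eq_some hf
          have hph : pvPhrase c0 = s := by
            have := List.find?_some hf
            simpa using this
          have hg : (pvRev pn).get? s = some (pvKey c0 pn) := by rw [pvRev_get?, hf]; rfl
          rw [hg]
          show rest.foldl _ ((pvTmpl pn v).insert (pvKey c0 pn) 1) = _
          rw [insert_tmpl pn v c0 hc0, ih]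
          unfold pvTmpl
          congr 1
          apply List.map_congr_left
          intro c hc
          by_cases hr : pvPhrase c ∈ rest
          · simp [hr, List.mem_cons]
          · by_cases hs : pvPhrase c = s
            · simp [hs, hph, List.mem_cons]
            · have : pvPhrase c ≠ pvPhrase c0 := by rw [hph]; exact hs
              simp [hr, hs, this, List.mem_cons]

-- A's nested fold, closed form
lemma A_closed (pn : Int) (ae : List String) :
    get_avalanche_problem_aspect_elevations_py pn ae
      = pvCombos.map (fun c => (pvKey c pn, if pvPhrase c ∈ ae then (1 : Int) else 0)) := by
  have h := PySem.Dict.items_foldl_insert_fresh pvCombos (fun c => pvKey c pn)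
      (fun c => if pvPhrase c ∈ ae then (1 : Int) else 0) PySem.Dict.empty
      (fun a _ => PySem.Dict.contains_empty _) (pvKeyNodup pn)
  have hsplit : (pvCombos.foldl (fun d c => d.insert (pvKey c pn)
        (if pvPhrase c ∈ ae then (1 : Int) else 0)) PySem.Dict.empty)
      = pvAspects.foldl (fun transformed a =>
          pvElevs.foldl (fun transformed e =>
            transformed.insert (a.1 ++ "_" ++ e.1 ++ "_" ++ PySem.Int.toStr pn)
              (if (a.2 ++ " " ++ e.2) ∈ ae then (1 : Int) else 0)) transformed) PySem.Dict.empty := by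
    rw [pvCombos, List.foldl_flatMap]
    simp [List.foldl_map, pvKey_def, pvPhrase]
    rfl
  rw [get_avalanche_problem_aspect_elevations_py, ← hsplit, h]
  simp [PySem.Dict.empty]

-- B's initialisation folds, closed forms
lemma B_init (pn : Int) :
    pvAspects.foldl (fun (p : PySem.Dict String Int × PySem.Dict String String) a =>
        pvElevs.foldl (fun p e =>
          (p.1.insert (a.1 ++ "_" ++ e.1 ++ "_" ++ PySem.Int.toStr pn) 0,
           p.2.insert (a.2 ++ " " ++ e.2) (a.1 ++ "_" ++ e.1 ++ "_" ++ PySem.Int.toStr pn))) p)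
      (PySem.Dict.empty, PySem.Dict.empty)
      = (pvTmpl pn (fun _ => 0), pvRev pn) := by
  have hsplit : pvAspects.foldl (fun (p : PySem.Dict String Int × PySem.Dict String String) a =>
        pvElevs.foldl (fun p e =>
          (p.1.insert (a.1 ++ "_" ++ e.1 ++ "_" ++ PySem.Int.toStr pn) 0,
           p.2.insert (a.2 ++ " " ++ e.2) (a.1 ++ "_" ++ e.1 ++ "_" ++ PySem.Int.toStr pn))) p)
      (PySem.Dict.empty, PySem.Dict.empty)
      = pvCombos.foldl (fun (p : PySem.Dict String Int × PySem.Dict String String) c =>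
          (p.1.insert (pvKey c pn) 0, p.2.insert (pvPhrase c) (pvKey c pn)))
        (PySem.Dict.empty, PySem.Dict.empty) := by
    rw [pvCombos, List.foldl_flatMap]
    simp [List.foldl_map, pvKey_def, pvPhrase]
  rw [hsplit, PySem.List.foldl_prod_mk (f := fun d c => PySem.Dict.insert d (pvKey c pn) 0)
        (g := fun d c => PySem.Dict.insert d (pvPhrase c) (pvKey c pn))]
  have h1 := PySem.Dict.items_foldl_insert_fresh pvCombos (fun c => pvKey c pn)
      (fun _ => (0 : Int)) PySem.Dict.empty
      (fun a _ => PySem.Dict.contains_empty _) (pvKeyNodup pn)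
  have h2 := PySem.Dict.items_foldl_insert_fresh pvCombos pvPhrase
      (fun c => pvKey c pn) PySem.Dict.empty
      (fun a _ => PySem.Dict.contains_empty _) (by decide : (pvCombos.map pvPhrase).Nodup)
  refine Prod.ext ?_ ?_
  · apply PySem.Dict.ext; rw [h1]; simp [PySem.Dict.empty, pvTmpl]
  · apply PySem.Dict.ext; rw [h2]; simp [PySem.Dict.empty, pvRev]

lemma B_closed (pn : Int) (ae : List String) :
    get_avalanche_problem_aspect_elevations_py_alt pn ae
      = pvCombos.map (fun c => (pvKey c pn, if pvPhrase c ∈ ae then (1 : Int) else 0)) := by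
  rw [get_avalanche_problem_aspect_elevations_py_alt]
  rw [B_init pn]
  show (ae.foldl _ (pvTmpl pn (fun _ => 0))).items = _
  rw [fold_tmpl pn ae (fun _ => 0)]
  rfl

-- ===== VERDICT (by name: the statement is the Claim_ definition above) =====
theorem get_avalanche_problem_aspect_elevations_py_spec : Claim_equal_get_avalanche_problem_aspect_elevations_py := by
  intro pn ae _
  show get_avalanche_problem_aspect_elevations_py pn ae = _
  rw [A_closed, B_closed]
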